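-- pv_equiv track=rewrite | github.com/jinsoo96/codingtest | 프로그래머스/unrated/133499. 옹알이 （2）/옹알이 （2）.py | solution
-- ===== SOURCE A (Python) =====
-- def solution(babbling):
--     # 조카가 발음할 수 있는 기본 발음
--     sounds = ["aya", "ye", "woo", "ma"]
--
--     # 문자열이 주어진 발음 조합으로 만들어질 수 있는지 확인
--     def can_make_sound(s):
--         while s:
--             found = False
--             for sound in sounds:
--                 if s.startswith(sound):
--                     s = s[len(sound):]
--                     found = True
--                     break
--             # 현재 문자열이 어떤 발음으로도 시작하지 않는 경우
--             if not found:
--                 return False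
--         return True
--
--     # 문자열 내에 연속된 발음이 있는지 확인
--     def has_consecutive_sound(s):
--         for sound in sounds:
--             if sound * 2 in s:
--                 return True
--         return False
--
--     count = 0
--     for word in babbling:
--         if can_make_sound(word) and not has_consecutive_sound(word):
--             count += 1
--
--     return count
-- ===== SOURCE B (Python) =====
-- def solution(babbling):
--     # single left-to-right pass per word: match one of the four sounds at the
--     # front, reject an immediate repeat of the previous sound, no separate
--     # doubled-substring scan
--     count = 0
--     for w in babbling:
--         prev = None
--         s = w
--         good = True
--         while s:
--             if s.startswith('aya'):
--                 cur = 0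
--             elif s.startswith('ye'):
--                 cur = 1
--             elif s.startswith('woo'):
--                 cur = 2
--             elif s.startswith('ma'):
--                 cur = 3
--             else:
--                 good = False
--                 break
--             if prev == cur:
--                 good = False
--                 break
--             s = s[(3, 2, 3, 2)[cur]:]
--             prev = cur
--         if good:
--             count += 1
--     return count
-- ===== Notes on version B (the rewrite author's own statement) =====
-- stated objective: alternative
-- what changed: Replaced A's two-phase check per word (greedy prefix parser plus four doubled-sound substring scans) with a single left-to-right matcher that tracks the previous sound and rejects an immediate repeat on the spot.
import Mathlib
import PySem

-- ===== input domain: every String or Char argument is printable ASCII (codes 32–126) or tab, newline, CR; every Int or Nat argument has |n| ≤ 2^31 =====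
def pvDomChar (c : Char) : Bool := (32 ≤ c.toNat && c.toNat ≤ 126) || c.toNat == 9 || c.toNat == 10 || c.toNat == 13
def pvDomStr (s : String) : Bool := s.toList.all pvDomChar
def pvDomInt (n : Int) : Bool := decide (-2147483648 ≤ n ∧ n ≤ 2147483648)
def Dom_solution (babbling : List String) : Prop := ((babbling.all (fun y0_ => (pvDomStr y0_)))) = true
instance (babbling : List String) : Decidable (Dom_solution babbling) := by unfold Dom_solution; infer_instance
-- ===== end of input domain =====

-- B replaces A's two-phase per-word check (greedy parse + four doubled-sound substring scans)
-- with a single pass that tracks the previous sound; alternative algorithm, same asymptotic cost.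

-- ===== PORT A =====
-- sounds = ["aya", "ye", "woo", "ma"]
def pvSounds : List (List Char) := [['a','y','a'], ['y','e'], ['w','o','o'], ['m','a']]

-- termination fact for the while loop of can_make_sound: a matched sound is nonempty
theorem pvSounds_find?_pos {s t : List Char}
    (h : pvSounds.find? (fun t => PySem.Chars.startswith s t) = some t) : 0 < t.length := by
  have ht := List.mem_of_find?_eq_some h
  fin_cases ht <;> simp

-- can_make_sound: while s: cut off the first sound s starts with, else return False
-- (s[len(sound):] is ported as List.drop — exact for this nonnegative index, PySem.List.slice_from)
def pvCanMake (s : List Char) : Bool :=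
  if h0 : s = [] then true
  else
    match h : pvSounds.find? (fun t => PySem.Chars.startswith s t) with
    | some t => pvCanMake (s.drop t.length)
    | none => false
termination_by s.length
decreasing_by
  have h1 := pvSounds_find?_pos h
  have h2 : 0 < s.length := List.length_pos_of_ne_nil h0
  simp only [List.length_drop]
  omega

-- has_consecutive_sound: some sound*2 is a substring
def pvHasConsec (s : List Char) : Bool :=
  pvSounds.any (fun t => PySem.Chars.isIn (t ++ t) s)

def solution (babbling : List String) : Int :=
  babbling.foldl
    (fun count word => if pvCanMake word.toList && !pvHasConsec word.toList then count + 1 else count) 0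

-- ===== PORT B =====
-- one pass: match a sound at the front (aya=0, ye=1, woo=2, ma=3), fail on an immediate repeat
def pvOk (prev : Option Nat) (s : List Char) : Bool :=
  match s with
  | [] => true
  | 'a'::'y'::'a'::r => if prev == some 0 then false else pvOk (some 0) r
  | 'y'::'e'::r      => if prev == some 1 then false else pvOk (some 1) r
  | 'w'::'o'::'o'::r => if prev == some 2 then false else pvOk (some 2) r
  | 'm'::'a'::r      => if prev == some 3 then false else pvOk (some 3) r
  | _ => false

def solution_alt (babbling : List String) : Int :=
  babbling.foldl (fun count word => if pvOk none word.toList then count + 1 else count) 0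

-- ===== PRECONDITION & SPEC =====
def Spec_solution (babbling : List String) (out : Int) : Prop := out = solution_alt babbling
instance (babbling : List String) (out : Int) : Decidable (Spec_solution babbling out) := by unfold Spec_solution; infer_instance

-- ===== CLAIM (what is proved, stated in full; the proofs are below) =====
def Claim_equal_solution : Prop := ∀ (babbling : List String), Dom_solution babbling → Spec_solution babbling (solution babbling)

-- ===== LEMMAS AND PROOFS =====

-- the "previous sound" guard B carries: does s start with that sound?
def pvGuard : Option Nat → List Char → Bool
  | none, _ => false
  | some i, s => PySem.Chars.startswith s (pvSounds.getD i [])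

theorem pvCanMake_nil : pvCanMake [] = true := by
  rw [pvCanMake]; simp

theorem pvFind_aya (r : List Char) :
    pvSounds.find? (fun t => PySem.Chars.startswith ('a'::'y'::'a'::r) t) = some ['a','y','a'] := by
  simp [pvSounds, PySem.Chars.startswith, List.isPrefixOf]

theorem pvFind_ye (r : List Char) :
    pvSounds.find? (fun t => PySem.Chars.startswith ('y'::'e'::r) t) = some ['y','e'] := by
  simp [pvSounds, PySem.Chars.startswith, List.isPrefixOf]

theorem pvFind_woo (r : List Char) :
    pvSounds.find? (fun t => PySem.Chars.startswith ('w'::'o'::'o'::r) t) = some ['w','o','o'] := by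
  simp [pvSounds, PySem.Chars.startswith, List.isPrefixOf]

theorem pvFind_ma (r : List Char) :
    pvSounds.find? (fun t => PySem.Chars.startswith ('m'::'a'::r) t) = some ['m','a'] := by
  simp [pvSounds, PySem.Chars.startswith, List.isPrefixOf]

theorem pvCanMake_aya (r : List Char) : pvCanMake ('a'::'y'::'a'::r) = pvCanMake r := by
  rw [pvCanMake, dif_neg (by simp)]
  split
  · rename_i t ht
    rw [pvFind_aya] at ht
    obtain rfl : t = ['a','y','a'] := by injection ht with ht'; exact ht'.symm
    rfl
  · rename_i ht; rw [pvFind_aya] at ht; cases ht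

theorem pvCanMake_ye (r : List Char) : pvCanMake ('y'::'e'::r) = pvCanMake r := by
  rw [pvCanMake, dif_neg (by simp)]
  split
  · rename_i t ht
    rw [pvFind_ye] at ht
    obtain rfl : t = ['y','e'] := by injection ht with ht'; exact ht'.symm
    rfl
  · rename_i ht; rw [pvFind_ye] at ht; cases ht

theorem pvCanMake_woo (r : List Char) : pvCanMake ('w'::'o'::'o'::r) = pvCanMake r := by
  rw [pvCanMake, dif_neg (by simp)]
  split
  · rename_i t ht
    rw [pvFind_woo] at ht
    obtain rfl : t = ['w','o','o'] := by injection ht with ht'; exact ht'.symm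
    rfl
  · rename_i ht; rw [pvFind_woo] at ht; cases ht

theorem pvCanMake_ma (r : List Char) : pvCanMake ('m'::'a'::r) = pvCanMake r := by
  rw [pvCanMake, dif_neg (by simp)]
  split
  · rename_i t ht
    rw [pvFind_ma] at ht
    obtain rfl : t = ['m','a'] := by injection ht with ht'; exact ht'.symm
    rfl
  · rename_i ht; rw [pvFind_ma] at ht; cases ht

theorem pvCanMake_false (s : List Char) (hs : s ≠ [])
    (h : pvSounds.find? (fun t => PySem.Chars.startswith s t) = none) : pvCanMake s = false := by
  rw [pvCanMake, dif_neg hs]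
  split
  · rename_i t ht; rw [h] at ht; cases ht
  · rfl

theorem pvCanMake_ya (r : List Char) : pvCanMake ('y'::'a'::r) = false := by
  refine pvCanMake_false _ (by simp) ?_
  simp [pvSounds, PySem.Chars.startswith, List.isPrefixOf]

theorem pvHasConsec_nil : pvHasConsec [] = false := by decide

theorem pvHasConsec_aya (r : List Char) (hc : pvCanMake r = true) :
    pvHasConsec ('a'::'y'::'a'::r) = (PySem.Chars.startswith r ['a','y','a'] || pvHasConsec r) := by
  have hya : ¬ (['y','a','a','y','a'] <+: r) := by
    rintro ⟨u, rfl⟩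
    simp only [List.cons_append] at hc
    rw [pvCanMake_ya] at hc
    cases hc
  rw [Bool.eq_iff_iff]
  simp [pvHasConsec, pvSounds, Bool.or_eq_true,
    PySem.Chars.isIn_iff_infix, PySem.Chars.startswith_iff,
    List.infix_cons_iff, List.cons_prefix_cons, hya]
  tauto

theorem pvHasConsec_ye (r : List Char) :
    pvHasConsec ('y'::'e'::r) = (PySem.Chars.startswith r ['y','e'] || pvHasConsec r) := by
  rw [Bool.eq_iff_iff]
  simp [pvHasConsec, pvSounds, Bool.or_eq_true,
    PySem.Chars.isIn_iff_infix, PySem.Chars.startswith_iff,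
    List.infix_cons_iff, List.cons_prefix_cons]
  tauto

theorem pvHasConsec_woo (r : List Char) :
    pvHasConsec ('w'::'o'::'o'::r) = (PySem.Chars.startswith r ['w','o','o'] || pvHasConsec r) := by
  rw [Bool.eq_iff_iff]
  simp [pvHasConsec, pvSounds, Bool.or_eq_true,
    PySem.Chars.isIn_iff_infix, PySem.Chars.startswith_iff,
    List.infix_cons_iff, List.cons_prefix_cons]
  tauto

theorem pvHasConsec_ma (r : List Char) (hc : pvCanMake r = true) :
    pvHasConsec ('m'::'a'::r) = (PySem.Chars.startswith r ['m','a'] || pvHasConsec r) := by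
  have hya : ¬ (['y','a','a','y','a'] <+: r) := by
    rintro ⟨u, rfl⟩
    simp only [List.cons_append] at hc
    rw [pvCanMake_ya] at hc
    cases hc
  rw [Bool.eq_iff_iff]
  simp [pvHasConsec, pvSounds, Bool.or_eq_true,
    PySem.Chars.isIn_iff_infix, PySem.Chars.startswith_iff,
    List.infix_cons_iff, List.cons_prefix_cons, hya]
  tauto

theorem pvMain : ∀ (n : Nat) (s : List Char), s.length ≤ n →
    ∀ p ∈ ([none, some 0, some 1, some 2, some 3] : List (Option Nat)),
    pvOk p s = (pvCanMake s && (!pvHasConsec s) && !pvGuard p s) := by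
  intro n
  induction n with
  | zero =>
    intro s hs p hp
    obtain rfl : s = [] := List.eq_nil_of_length_eq_zero (by omega)
    fin_cases hp <;>
      simp [pvOk, pvCanMake_nil, pvHasConsec_nil, pvGuard, pvSounds,
        PySem.Chars.startswith]
  | succ n ih =>
    intro s hs p hp
    rw [pvOk.eq_def]
    split
    · -- s = []
      fin_cases hp <;>
        simp [pvCanMake_nil, pvHasConsec_nil, pvGuard, pvSounds,
          PySem.Chars.startswith]
    · -- aya
      rename_i r
      have hlen : r.length ≤ n := by simp at hs; omega
      have ih0 := ih r hlen (some 0) (by simp)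
      rw [pvCanMake_aya]
      by_cases hc : pvCanMake r = true
      · rw [pvHasConsec_aya r hc, ih0, hc]
        fin_cases hp <;>
          simp [pvGuard, pvSounds, PySem.Chars.startswith, List.isPrefixOf] <;>
          (try rw [Bool.and_comm])
      · rw [Bool.not_eq_true] at hc
        rw [hc, ih0, hc]
        simp
    · -- ye
      rename_i r
      have hlen : r.length ≤ n := by simp at hs; omega
      have ih0 := ih r hlen (some 1) (by simp)
      rw [pvCanMake_ye]
      by_cases hc : pvCanMake r = true
      · rw [pvHasConsec_ye r, ih0, hc]
        fin_cases hp <;>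
          simp [pvGuard, pvSounds, PySem.Chars.startswith, List.isPrefixOf] <;>
          (try rw [Bool.and_comm])
      · rw [Bool.not_eq_true] at hc
        rw [hc, ih0, hc]
        simp
    · -- woo
      rename_i r
      have hlen : r.length ≤ n := by simp at hs; omega
      have ih0 := ih r hlen (some 2) (by simp)
      rw [pvCanMake_woo]
      by_cases hc : pvCanMake r = true
      · rw [pvHasConsec_woo r, ih0, hc]
        fin_cases hp <;>
          simp [pvGuard, pvSounds, PySem.Chars.startswith, List.isPrefixOf] <;>
          (try rw [Bool.and_comm])
      · rw [Bool.not_eq_true] at hc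
        rw [hc, ih0, hc]
        simp
    · -- ma
      rename_i r
      have hlen : r.length ≤ n := by simp at hs; omega
      have ih0 := ih r hlen (some 3) (by simp)
      rw [pvCanMake_ma]
      by_cases hc : pvCanMake r = true
      · rw [pvHasConsec_ma r hc, ih0, hc]
        fin_cases hp <;>
          simp [pvGuard, pvSounds, PySem.Chars.startswith, List.isPrefixOf] <;>
          (try rw [Bool.and_comm])
      · rw [Bool.not_eq_true] at hc
        rw [hc, ih0, hc]
        simp
    · -- no sound matches
      rename_i s2 hnil haya hye hwoo hma
      have hfind : pvSounds.find? (fun t => PySem.Chars.startswith s t) = none := by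
        rw [List.find?_eq_none]
        intro t ht
        fin_cases ht
        · intro hpre; obtain ⟨u, hu⟩ := (PySem.Chars.startswith_iff _ _).mp hpre; exact haya u hu.symm
        · intro hpre; obtain ⟨u, hu⟩ := (PySem.Chars.startswith_iff _ _).mp hpre; exact hye u hu.symm
        · intro hpre; obtain ⟨u, hu⟩ := (PySem.Chars.startswith_iff _ _).mp hpre; exact hwoo u hu.symm
        · intro hpre; obtain ⟨u, hu⟩ := (PySem.Chars.startswith_iff _ _).mp hpre; exact hma u hu.symm
      rw [pvCanMake_false s (fun h => hnil h) hfind]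
      simp

theorem pvWord (s : List Char) : pvOk none s = (pvCanMake s && !pvHasConsec s) := by
  have h := pvMain s.length s le_rfl none (by simp)
  simpa [pvGuard] using h

theorem pvFold (l : List String) (c : Int) :
    l.foldl (fun count word => if pvCanMake word.toList && !pvHasConsec word.toList then count + 1 else count) c
      = l.foldl (fun count word => if pvOk none word.toList then count + 1 else count) c := by
  induction l generalizing c with
  | nil => rfl
  | cons w l ih => simp only [List.foldl_cons, pvWord, ih]

-- ===== VERDICT (by name: the statement is the Claim_ definition above) =====
theorem solution_spec : Claim_equal_solution := by
  intro babbling _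
  unfold Spec_solution solution solution_alt
  exact pvFold babbling 0
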